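-- pv_equiv track=rewrite | github.com/Swarupla/Ingrain_pam | SAST Scan _R4.7_PAM/AIServices_Python/ai_services_pheonix/similarity_analytics.py | trainprocess_txt
-- ===== SOURCE A (Python) =====
-- def trainprocess_txt(text):
--     text=text.splitlines()
--     final_text=''
--     for data in text:
--         new_text = data.lower()
--         new_text=str(new_text).encode('ascii',"ignore").decode('ascii')
--         #new_text=re.sub('[@!#$%^&*()<>[\]?/\|\'\"\`}{~:=;\+,-]',' ',new_text)
--         #new_text = nltk.word_tokenize(new_text)
--         #new_text=' '.join(new_text)
--         final_text+=new_text+'\n'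
--     final_text=final_text[0:-1]
--     return final_text
-- ===== SOURCE B (Python) =====
-- def trainprocess_txt(text):
--     joined = '\n'.join(text.splitlines())
--     return joined.lower().encode('ascii', 'ignore').decode('ascii')
-- ===== Notes on version B (the rewrite author's own statement) =====
-- stated objective: simpler
-- what changed: The per-line loop with a string accumulator and the trailing-newline trim are replaced by whole-string operations: join the split lines once with a newline separator, then lower() and ASCII-ignore the joined string (both are per-character and the newline separator is ASCII, so this equals per-line processing).
import Mathlib
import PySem

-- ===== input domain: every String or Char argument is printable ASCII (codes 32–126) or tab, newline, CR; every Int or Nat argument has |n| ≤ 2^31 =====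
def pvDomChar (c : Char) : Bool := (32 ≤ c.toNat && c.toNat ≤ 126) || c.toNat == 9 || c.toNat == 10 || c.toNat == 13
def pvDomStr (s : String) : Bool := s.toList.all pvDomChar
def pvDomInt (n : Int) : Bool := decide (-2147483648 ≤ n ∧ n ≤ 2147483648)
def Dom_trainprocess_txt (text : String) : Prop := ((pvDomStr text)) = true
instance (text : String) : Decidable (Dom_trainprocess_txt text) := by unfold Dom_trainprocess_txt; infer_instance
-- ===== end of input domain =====

-- ===== PORT A =====
-- Re-implementation B (header): lowercase + ASCII-strip each line; B joins the lines once and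
-- transforms the whole string instead of looping with a string accumulator (objective: simpler).
-- encode('ascii','ignore').decode('ascii') keeps exactly the characters with code point < 128 (exact).
def pvAsciiIgnore (cs : List Char) : List Char := cs.filter (fun c => c.toNat < 128)

def trainprocess_txt (text : String) : String :=
  let lines := PySem.Chars.splitlines text.toList
  let final_text := lines.foldl (fun acc data =>
      let new_text := PySem.Chars.lower data
      let new_text := pvAsciiIgnore new_text
      acc ++ (new_text ++ ['\n'])) []
  String.ofList (PySem.List.slice final_text (some 0) (some (-1)))

-- ===== PORT B =====
def trainprocess_txt_alt (text : String) : String :=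
  let joined := PySem.Chars.join ['\n'] (PySem.Chars.splitlines text.toList)
  String.ofList (pvAsciiIgnore (PySem.Chars.lower joined))

-- ===== PRECONDITION & SPEC =====
def Spec_trainprocess_txt (text : String) (out : String) : Prop := out = trainprocess_txt_alt text
instance (text : String) (out : String) : Decidable (Spec_trainprocess_txt text out) := by unfold Spec_trainprocess_txt; infer_instance

-- ===== CLAIM (what is proved, stated in full; the proofs are below) =====
def Claim_equal_trainprocess_txt : Prop := ∀ (text : String), Dom_trainprocess_txt text → Spec_trainprocess_txt text (trainprocess_txt text)

-- ===== LEMMAS AND PROOFS =====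

lemma pv_intercalate_cons_cons (sep d e : List Char) (ls : List (List Char)) :
    List.intercalate sep (d :: e :: ls) = d ++ sep ++ List.intercalate sep (e :: ls) := by
  simp [List.intercalate, List.intersperse]

-- the per-line transformation both programs apply
def pvLineF (d : List Char) : List Char := pvAsciiIgnore (PySem.Chars.lower d)

-- A side: the accumulated string with trailing '\n's, after dropLast, is the '\n'-intercalation
lemma pv_A_side (ls : List (List Char)) :
    (ls.flatMap (fun d => pvLineF d ++ ['\n'])).dropLast
      = List.intercalate ['\n'] (ls.map pvLineF) := by
  induction ls with
  | nil => simp [List.intercalate]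
  | cons d ls ih =>
    cases ls with
    | nil => simp [List.intercalate]
    | cons e ls' =>
      rw [List.flatMap_cons, List.dropLast_append]
      rw [if_neg (by simp [List.isEmpty_iff])]
      rw [ih]
      simp only [List.map_cons]
      rw [pv_intercalate_cons_cons]

-- lower and the ASCII filter are per-character maps, so they distribute over ++
lemma pv_transform_append (x y : List Char) :
    pvAsciiIgnore (PySem.Chars.lower (x ++ y))
      = pvAsciiIgnore (PySem.Chars.lower x) ++ pvAsciiIgnore (PySem.Chars.lower y) := by
  simp [pvAsciiIgnore, PySem.Chars.lower]

-- B side: lowering then ASCII-filtering the joined string = intercalating the per-line results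
lemma pv_B_side (ls : List (List Char)) :
    pvAsciiIgnore (PySem.Chars.lower (List.intercalate ['\n'] ls))
      = List.intercalate ['\n'] (ls.map pvLineF) := by
  induction ls with
  | nil => simp [List.intercalate, PySem.Chars.lower, pvAsciiIgnore]
  | cons d ls ih =>
    cases ls with
    | nil => simp [List.intercalate, pvLineF]
    | cons e ls' =>
      rw [pv_intercalate_cons_cons]
      simp only [List.map_cons] at ih ⊢
      rw [pv_intercalate_cons_cons, pv_transform_append, pv_transform_append, ih]
      have hnl : pvAsciiIgnore (PySem.Chars.lower ['\n']) = ['\n'] := by decide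
      rw [hnl]
      rfl

-- ===== VERDICT (by name: the statement is the Claim_ definition above) =====
theorem trainprocess_txt_spec : Claim_equal_trainprocess_txt := by
  intro text _
  unfold Spec_trainprocess_txt trainprocess_txt trainprocess_txt_alt
  show String.ofList (PySem.List.slice
      ((PySem.Chars.splitlines text.toList).foldl (fun acc d => acc ++ (pvLineF d ++ ['\n'])) [])
      (some 0) (some (-1)))
    = String.ofList (pvAsciiIgnore (PySem.Chars.lower
        (List.intercalate ['\n'] (PySem.Chars.splitlines text.toList))))
  rw [PySem.List.foldl_append_eq_flatMap (fun d => pvLineF d ++ ['\n']), List.nil_append]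
  have hslice : ∀ (xs : List Char), PySem.List.slice xs (some 0) (some (-1)) = xs.dropLast := by
    intro xs; simp [pysem]
  rw [hslice, pv_A_side, pv_B_side]
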